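-- pv_equiv track=rewrite | github.com/stdstring/usagestat.ideco | stat_sender/src/data_processor/data2xml_processor.py | _create_result_xml
-- ===== SOURCE A (Python) =====
-- def _create_result_xml(aggregated_data):
--     source_storage = []
--     for source in aggregated_data:
--         category_storage = []
--         for category in aggregated_data[source]:
--             category_internal_data = ''.join(aggregated_data[source][category])
--             category_data = '<%(category)s>%(data)s</%(category)s>' % {'category':category, 'data':category_internal_data}
--             category_storage.append(category_data)
--         source_internal_data = ''.join(category_storage)
--         source_data = '<%(source)s>%(data)s</%(source)s>' % {'source':source, 'data':source_internal_data}
--         source_storage.append(source_data)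
--     total_data = ''.join(source_storage)
--     return '<stat_data>%(data)s</stat_data>' % {'data': total_data}
-- ===== SOURCE B (Python) =====
-- def _create_result_xml(aggregated_data):
--     def render(tag, value):
--         if isinstance(value, dict):
--             inner = ''.join(render(k, v) for k, v in value.items())
--         else:
--             inner = ''.join(value)
--         return '<%s>%s</%s>' % (tag, inner, tag)
--     return render('stat_data', aggregated_data)
-- ===== Notes on version B (the rewrite author's own statement) =====
-- stated objective: simpler
-- what changed: Replaces the two fixed-depth explicit loops with storage lists by a single generic recursive serializer render(tag, value) that wraps joined children at every level.
import Mathlib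
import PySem

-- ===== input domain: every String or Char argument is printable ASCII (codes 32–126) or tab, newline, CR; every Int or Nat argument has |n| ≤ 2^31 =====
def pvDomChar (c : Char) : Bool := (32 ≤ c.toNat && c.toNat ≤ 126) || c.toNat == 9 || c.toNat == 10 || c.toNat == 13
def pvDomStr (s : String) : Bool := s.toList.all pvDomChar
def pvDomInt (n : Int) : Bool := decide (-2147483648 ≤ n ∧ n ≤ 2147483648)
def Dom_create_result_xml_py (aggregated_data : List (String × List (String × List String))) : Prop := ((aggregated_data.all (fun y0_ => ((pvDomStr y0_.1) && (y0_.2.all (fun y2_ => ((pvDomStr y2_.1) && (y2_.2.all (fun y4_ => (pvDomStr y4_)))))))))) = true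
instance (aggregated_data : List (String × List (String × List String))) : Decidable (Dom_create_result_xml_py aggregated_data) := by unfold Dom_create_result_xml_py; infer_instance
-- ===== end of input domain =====

-- B replaces A's two fixed-depth loops with a single generic recursive serializer (objective: simpler).

-- ===== PORT A =====
-- A: two nested loops appending '<tag>…</tag>' strings to explicit storage lists, then joining.
def create_result_xml_py (aggregated_data : List (String × List (String × List String))) : String :=
  let source_storage :=
    aggregated_data.foldl (fun acc source =>
      let category_storage :=
        source.2.foldl (fun cacc category =>
          let category_internal_data := PySem.Str.join "" category.2
          let category_data := "<" ++ category.1 ++ ">" ++ category_internal_data ++ "</" ++ category.1 ++ ">"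
          cacc ++ [category_data]) []
      let source_internal_data := PySem.Str.join "" category_storage
      let source_data := "<" ++ source.1 ++ ">" ++ source_internal_data ++ "</" ++ source.1 ++ ">"
      acc ++ [source_data]) []
  let total_data := PySem.Str.join "" source_storage
  "<stat_data>" ++ total_data ++ "</stat_data>"

-- ===== PORT B =====
-- B: render(tag, value) — wrap the joined children; one instance per level of the (typed) nesting.
def pvWrap (tag inner : String) : String := "<" ++ tag ++ ">" ++ inner ++ "</" ++ tag ++ ">"

def pvRenderCat (tag : String) (value : List String) : String :=
  pvWrap tag (PySem.Str.join "" value)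

def pvRenderSrc (tag : String) (value : List (String × List String)) : String :=
  pvWrap tag (PySem.Str.join "" (value.map (fun kv => pvRenderCat kv.1 kv.2)))

def create_result_xml_py_alt (aggregated_data : List (String × List (String × List String))) : String :=
  pvWrap "stat_data" (PySem.Str.join "" (aggregated_data.map (fun kv => pvRenderSrc kv.1 kv.2)))

-- ===== PRECONDITION & SPEC =====
def Spec_create_result_xml_py (aggregated_data : List (String × List (String × List String))) (out : String) : Prop := out = create_result_xml_py_alt aggregated_data
instance (aggregated_data : List (String × List (String × List String))) (out : String) : Decidable (Spec_create_result_xml_py aggregated_data out) := by unfold Spec_create_result_xml_py; infer_instance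

-- ===== CLAIM (what is proved, stated in full; the proofs are below) =====
def Claim_equal_create_result_xml_py : Prop := ∀ (aggregated_data : List (String × List (String × List String))), Dom_create_result_xml_py aggregated_data → Spec_create_result_xml_py aggregated_data (create_result_xml_py aggregated_data)

-- ===== LEMMAS AND PROOFS =====

-- A's inner loop builds exactly the list B maps over a source's categories.
theorem pv_inner_eq (cats : List (String × List String)) :
    cats.foldl (fun cacc category =>
      cacc ++ ["<" ++ category.1 ++ ">" ++ PySem.Str.join "" category.2 ++ "</" ++ category.1 ++ ">"]) []
    = cats.map (fun kv => pvRenderCat kv.1 kv.2) := by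
  rw [PySem.List.foldl_append_singleton_eq_map]
  simp [pvRenderCat, pvWrap]

-- A's outer loop builds exactly the list B maps over the sources.
theorem pv_outer_eq (d : List (String × List (String × List String))) :
    d.foldl (fun acc source =>
      acc ++ ["<" ++ source.1 ++ ">" ++
        PySem.Str.join "" (source.2.foldl (fun cacc category =>
          cacc ++ ["<" ++ category.1 ++ ">" ++ PySem.Str.join "" category.2 ++ "</" ++ category.1 ++ ">"]) []) ++
        "</" ++ source.1 ++ ">"]) []
    = d.map (fun kv => pvRenderSrc kv.1 kv.2) := by
  rw [PySem.List.foldl_append_singleton_eq_map]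
  simp only [List.nil_append]
  apply List.map_congr_left
  intro s _
  rw [pv_inner_eq]
  simp [pvRenderSrc, pvWrap, String.append_assoc]

-- ===== VERDICT (by name: the statement is the Claim_ definition above) =====
theorem create_result_xml_py_spec : Claim_equal_create_result_xml_py := by
  intro d _
  unfold Spec_create_result_xml_py create_result_xml_py create_result_xml_py_alt
  rw [pv_outer_eq]
  simp [pvWrap, String.append_assoc]
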